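-- pv_equiv track=rewrite | github.com/anetczuk/gcc-uml | src/gcclangrawparser/plantuml.py | calculate_combinations
-- ===== SOURCE A (Python) =====
-- def calculate_combinations(actors_list, index):
--     ret_list = []
--     list_size = len(actors_list)
--     item = actors_list[index]
--     reduced_list = actors_list.copy()
--     del reduced_list[index]
--     for i in range(0, list_size):
--         curr_actor = reduced_list.copy()
--         curr_actor.insert(i, item)
--         ret_list.append(curr_actor)
--     return ret_list
-- ===== SOURCE B (Python) =====
-- def calculate_combinations(actors_list, index):
--     item = actors_list[index]
--     reduced = actors_list.copy()
--     del reduced[index]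
--     curr = [item] + reduced
--     ret = [curr.copy()]
--     for i in range(1, len(actors_list)):
--         curr[i - 1], curr[i] = curr[i], curr[i - 1]
--         ret.append(curr.copy())
--     return ret
-- ===== Notes on version B (the rewrite author's own statement) =====
-- stated objective: alternative
-- what changed: B builds one working list [item]+reduced and slides the item rightward by adjacent swaps (curr[i-1],curr[i]=curr[i],curr[i-1]), appending a copy after each swap, instead of rebuilding every combination from reduced_list with copy+insert.
import Mathlib
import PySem

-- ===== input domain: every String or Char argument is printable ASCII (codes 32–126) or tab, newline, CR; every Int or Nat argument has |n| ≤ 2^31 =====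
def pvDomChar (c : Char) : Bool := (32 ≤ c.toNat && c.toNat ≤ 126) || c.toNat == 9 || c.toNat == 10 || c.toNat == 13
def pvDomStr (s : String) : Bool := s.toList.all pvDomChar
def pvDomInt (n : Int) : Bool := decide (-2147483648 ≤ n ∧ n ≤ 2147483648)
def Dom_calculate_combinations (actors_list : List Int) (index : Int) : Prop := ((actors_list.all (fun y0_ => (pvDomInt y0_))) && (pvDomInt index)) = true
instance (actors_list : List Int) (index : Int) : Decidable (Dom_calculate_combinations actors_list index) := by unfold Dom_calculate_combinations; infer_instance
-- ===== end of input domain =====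

-- B slides the inserted item rightward through one working list by adjacent swaps (appending a copy each step)
-- instead of rebuilding each combination from reduced_list with copy+insert: alternative decomposition, same cost.


-- ===== PORT A =====
-- item = actors_list[index]; reduced = copy; del reduced[index]  ≡  pop? (none = IndexError, excluded by Pre_)
def calculate_combinations (actors_list : List Int) (index : Int) : List (List Int) :=
  let list_size : Int := actors_list.length
  match PySem.List.pop? actors_list index with
  | none => []
  | some (item, reduced_list) =>
    (PySem.List.pyRange 0 list_size 1).foldl
      (fun ret_list i => ret_list ++ [PySem.List.insert reduced_list i item]) []

-- ===== PORT B =====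
-- curr[i-1], curr[i] = curr[i], curr[i-1]  (both reads from the old list)
def pvSwapStep (c : List Int) (i : Nat) : List Int :=
  (c.set (i - 1) (c.getD i 0)).set i (c.getD (i - 1) 0)

def calculate_combinations_alt (actors_list : List Int) (index : Int) : List (List Int) :=
  match PySem.List.pop? actors_list index with
  | none => []
  | some (item, reduced) =>
    let curr := item :: reduced
    ((PySem.List.pyRange 1 (actors_list.length : Int) 1).foldl
      (fun (st : List Int × List (List Int)) i =>
        let c := pvSwapStep st.1 i.toNat
        (c, st.2 ++ [c])) (curr, [curr])).2

-- ===== PRECONDITION & SPEC =====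
-- A raises IndexError when index is out of range (including the empty list); excluded.
def Pre_calculate_combinations (actors_list : List Int) (index : Int) : Prop :=
  PySem.Raise.InRange actors_list.length index
instance (actors_list : List Int) (index : Int) : Decidable (Pre_calculate_combinations actors_list index) := by unfold Pre_calculate_combinations; infer_instance
def pvWitness_calculate_combinations : List Int × Int := ([3, 1, 2], 1)

def Spec_calculate_combinations (actors_list : List Int) (index : Int) (out : List (List Int)) : Prop := out = calculate_combinations_alt actors_list index
instance (actors_list : List Int) (index : Int) (out : List (List Int)) : Decidable (Spec_calculate_combinations actors_list index out) := by unfold Spec_calculate_combinations; infer_instance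

-- ===== CLAIM (what is proved, stated in full; the proofs are below) =====
def Claim_equal_calculate_combinations : Prop := ∀ (actors_list : List Int) (index : Int), Dom_calculate_combinations actors_list index → Pre_calculate_combinations actors_list index → Spec_calculate_combinations actors_list index (calculate_combinations actors_list index)

-- ===== LEMMAS AND PROOFS =====

-- the i-th combination: item inserted at position i of reduced
def pvSpec (item : Int) (reduced : List Int) (k : Nat) : List Int :=
  reduced.take k ++ item :: reduced.drop k

lemma pvSwap_spec (item : Int) : ∀ (k : Nat) (reduced : List Int), k < reduced.length →
    pvSwapStep (pvSpec item reduced k) (k + 1) = pvSpec item reduced (k + 1) := by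
  intro k
  induction k with
  | zero =>
    intro reduced h
    cases reduced with
    | nil => simp at h
    | cons a r => simp [pvSpec, pvSwapStep]
  | succ k ih =>
    intro reduced h
    cases reduced with
    | nil => simp at h
    | cons a r =>
      have hr : k < r.length := by simpa using h
      have := ih r hr
      simp only [pvSpec, List.take_succ_cons, List.drop_succ_cons, List.cons_append] at this ⊢
      simpa [pvSwapStep, List.getD_cons_succ, List.set_cons_succ] using congrArg (a :: ·) this

lemma pvInsert_eq_spec (item : Int) (reduced : List Int) (k : Nat) (hk : k ≤ reduced.length) :
    PySem.List.insert reduced (k : Int) item = pvSpec item reduced k := by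
  rw [PySem.List.insert_natCast reduced k item hk]; rfl

-- A's loop produces the map of pvSpec over 0..n
lemma pvA_loop (item : Int) (reduced : List Int) :
    (PySem.List.pyRange 0 ((reduced.length : Int) + 1) 1).foldl
      (fun ret i => ret ++ [PySem.List.insert reduced i item]) []
    = (List.range (reduced.length + 1)).map (pvSpec item reduced) := by
  rw [PySem.List.foldl_append_singleton_eq_map]
  have h0 : (PySem.List.pyRange 0 ((reduced.length : Int) + 1) 1)
      = (List.range (reduced.length + 1)).map (fun k : Nat => (k : Int)) := by
    have := PySem.List.pyRange_zero_nat (reduced.length + 1)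
    simpa using this
  rw [h0]
  simp only [List.nil_append, List.map_map]
  apply List.map_congr_left
  intro k hk
  have hk' : k ≤ reduced.length := by
    have := List.mem_range.mp hk; omega
  simp [Function.comp, pvInsert_eq_spec item reduced k hk']

-- B's loop invariant
lemma pvB_loop (item : Int) (reduced : List Int) : ∀ (k : Nat), k ≤ reduced.length →
    (PySem.List.pyRange 1 ((k : Int) + 1) 1).foldl
      (fun (st : List Int × List (List Int)) i =>
        let c := pvSwapStep st.1 i.toNat
        (c, st.2 ++ [c])) (item :: reduced, [item :: reduced])
    = (pvSpec item reduced k, (List.range (k + 1)).map (pvSpec item reduced)) := by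
  intro k
  induction k with
  | zero =>
    intro _
    rw [PySem.List.pyRange_one_eq_nil (by omega)]
    simp [pvSpec]
  | succ k ih =>
    intro h
    have hk : k ≤ reduced.length := by omega
    have hrange : PySem.List.pyRange 1 ((k : Int) + 1 + 1) 1
        = PySem.List.pyRange 1 ((k : Int) + 1) 1 ++ [(k : Int) + 1] := by
      have := PySem.List.pyRange_one_succ_right (a := 1) (b := (k : Int) + 1) (by omega)
      simpa using this
    rw [show ((k + 1 : Nat) : Int) = (k : Int) + 1 by push_cast; ring, hrange,
      List.foldl_append, ih hk]
    have htn : ((k : Int) + 1).toNat = k + 1 := by omega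
    have hswap := pvSwap_spec item k reduced (by omega)
    simp only [List.foldl_cons, List.foldl_nil, htn, hswap]
    rw [List.range_succ (n := k + 1), List.map_append]
    simp

-- ===== VERDICT (by name: the statement is the Claim_ definition above) =====
theorem calculate_combinations_spec : Claim_equal_calculate_combinations := by
  intro actors_list index _ _
  unfold Spec_calculate_combinations calculate_combinations calculate_combinations_alt
  cases hpop : PySem.List.pop? actors_list index with
  | none => rfl
  | some r =>
    obtain ⟨item, reduced⟩ := r
    have hlen : reduced.length + 1 = actors_list.length :=
      PySem.List.length_of_pop?_eq_some actors_list hpop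
    simp only []
    rw [show (actors_list.length : Int) = (reduced.length : Int) + 1 by omega]
    rw [pvA_loop, pvB_loop item reduced reduced.length (le_refl _)]
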